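-- pv_equiv track=rewrite | github.com/KarolinaGorska/pp1 | 04-Subroutines/ex40.py | f
-- ===== SOURCE A (Python) =====
-- def f(number):
--     number_str = str(number)
--     digit_count = {}
--
--     for digit in number_str:
--         if digit.isdigit():
--             if digit in digit_count:
--                 digit_count[digit] += 1
--             else:
--                 digit_count[digit] = 1
--
--     sum_repeated_digits = 0
--     for digit, count in digit_count.items():
--         if count > 1:
--             sum_repeated_digits += int(digit) * count
--
--     return sum_repeated_digits
-- ===== SOURCE B (Python) =====
-- def f(number):
--     digits = sorted(c for c in str(number) if c.isdigit())
--     total = 0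
--     i = 0
--     n = len(digits)
--     while i < n:
--         j = i
--         while j < n and digits[j] == digits[i]:
--             j += 1
--         if j - i > 1:
--             total += int(digits[i]) * (j - i)
--         i = j
--     return total
-- ===== Notes on version B (the rewrite author's own statement) =====
-- stated objective: alternative
-- what changed: Replaces A's hash count table (built char-by-char, then scanned via items()) with sort-then-scan: the digit characters are sorted so equal digits form contiguous runs, and one two-pointer pass sums int(d)*run_length for each run longer than 1.
import Mathlib
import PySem

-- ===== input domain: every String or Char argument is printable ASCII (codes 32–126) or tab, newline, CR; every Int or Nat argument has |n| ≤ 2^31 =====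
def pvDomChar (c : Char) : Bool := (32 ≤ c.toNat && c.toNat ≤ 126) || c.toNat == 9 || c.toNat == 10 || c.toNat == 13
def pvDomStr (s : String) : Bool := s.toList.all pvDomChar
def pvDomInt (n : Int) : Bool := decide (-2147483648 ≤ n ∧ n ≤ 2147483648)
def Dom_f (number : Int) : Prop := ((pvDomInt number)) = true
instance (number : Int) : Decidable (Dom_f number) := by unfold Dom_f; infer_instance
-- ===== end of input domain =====

-- B replaces A's hash count table with sort-then-scan: the digit characters are sorted so
-- equal digits form contiguous runs, and one pass sums int(d)*run_length for runs longer
-- than 1 (objective: alternative).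

-- int(digit) for a single character; in both programs it is only applied to digit
-- characters '0'..'9', where PySem.Int.ofChars? always returns some (the default is dead).
def pvDigitVal (digit : Char) : Int := (PySem.Int.ofChars? [digit]).getD 0

-- ===== PORT A =====
def f (number : Int) : Int :=
  let numberStr := PySem.Int.toChars number
  let digitCount : PySem.Dict Char Int :=
    numberStr.foldl (fun d digit =>
      if PySem.Chars.isdigit digit then
        if d.contains digit then d.insert digit (d.getD digit 0 + 1)
        else d.insert digit 1
      else d) PySem.Dict.empty
  digitCount.items.foldl
    (fun acc kv => if kv.2 > 1 then acc + pvDigitVal kv.1 * kv.2 else acc) 0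

-- ===== PORT B =====
-- Source B's outer while loop: each step consumes one contiguous run (the inner while loop
-- 'j += 1 while digits[j] == digits[i]' is the takeWhile/dropWhile of the run).
def pvRunScan : List Char → Int
  | [] => 0
  | x :: xs =>
    let run := xs.takeWhile (fun c => c == x)
    let rest := xs.dropWhile (fun c => c == x)
    let len : Int := (run.length : Int) + 1
    (if len > 1 then pvDigitVal x * len else 0) + pvRunScan rest
termination_by l => l.length
decreasing_by
  simpa using Nat.lt_succ_of_le (List.length_dropWhile_le _ _)

def f_alt (number : Int) : Int :=
  let digits := PySem.List.sorted
    ((PySem.Int.toChars number).filter PySem.Chars.isdigit) (fun c => c) false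
  pvRunScan digits

-- ===== PRECONDITION & SPEC =====
def Spec_f (number : Int) (out : Int) : Prop := out = f_alt number
instance (number : Int) (out : Int) : Decidable (Spec_f number out) := by unfold Spec_f; infer_instance

-- ===== CLAIM (what is proved, stated in full; the proofs are below) =====
def Claim_equal_f : Prop := ∀ (number : Int), Dom_f number → Spec_f number (f number)

-- ===== LEMMAS AND PROOFS =====

-- A's conditional-accumulation loop as a sum of an if-mapped list
theorem pv_foldl_if_add {α : Type} (p : α → Prop) [DecidablePred p] (g : α → Int)
    (l : List α) (init : Int) :
    l.foldl (fun acc x => if p x then acc + g x else acc) init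
      = init + (l.map (fun x => if p x then g x else 0)).sum := by
  induction l generalizing init with
  | nil => simp
  | cons x xs ih =>
    simp only [List.foldl_cons, List.map_cons, List.sum_cons, ih]
    by_cases h : p x <;> simp [h, add_assoc]

-- A's counting loop builds exactly Counter(digit characters)
theorem pv_dict_eq_counter (cs : List Char) :
    cs.foldl (fun d digit =>
      if PySem.Chars.isdigit digit then
        if d.contains digit then d.insert digit (d.getD digit 0 + 1)
        else d.insert digit 1
      else d) PySem.Dict.empty
    = PySem.Dict.counter (cs.filter PySem.Chars.isdigit) := by
  rw [← PySem.Dict.foldl_insert_getD_add_one_eq_counter, List.foldl_filter]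
  congr 1
  funext d c
  by_cases hc : PySem.Chars.isdigit c = true
  · simp only [hc, if_true]
    by_cases hm : d.contains c = true
    · simp [hm]
    · simp [hm, PySem.Dict.getD_of_not_contains d 0 (by simpa using hm)]
  · simp [hc]

-- the per-digit contribution, as a function of a list and its counts
def pvContrib (l : List Char) (c : Char) : Int :=
  if (1 : Int) < (l.count c : Int) then pvDigitVal c * (l.count c : Int) else 0

-- B's run scan over a sorted (Pairwise ≤) list = the Finset sum of contributions
theorem pv_runScan_sorted (l : List Char) (h : l.Pairwise (· ≤ ·)) :
    pvRunScan l = ∑ c ∈ l.toFinset, pvContrib l c := by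
  induction hn : l.length using Nat.strong_induction_on generalizing l with
  | _ n ih =>
    cases l with
    | nil => simp [pvRunScan]
    | cons x xs =>
      have hxs_le : ∀ y ∈ xs, x ≤ y := fun y hy => (List.pairwise_cons.mp h).1 y hy
      have hxs_pw : xs.Pairwise (· ≤ ·) := (List.pairwise_cons.mp h).2
      set run := xs.takeWhile (fun c => c == x) with hrun
      set rest := xs.dropWhile (fun c => c == x) with hrest
      have hsplit : run ++ rest = xs := List.takeWhile_append_dropWhile
      have hrun_all : ∀ c ∈ run, c = x := by
        intro c hc
        have := List.mem_takeWhile_imp hc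
        simpa using this
      have hrest_pw : rest.Pairwise (· ≤ ·) :=
        hxs_pw.sublist (List.dropWhile_sublist _)
      have hx_rest : x ∉ rest := by
        intro hx
        cases hr : rest with
        | nil => simp [hr] at hx
        | cons r rs =>
          have hrne : ¬ (r == x) = true := by
            have := List.head?_dropWhile_not (fun c => c == x) xs
            rw [← hrest, hr] at this
            simpa using this
          have hrx : r ≠ x := by simpa using hrne
          have hxr : x ≤ r := hxs_le r (by
            rw [← hsplit, hr]; exact List.mem_append_right _ List.mem_cons_self)
          rw [hr] at hx
          rcases List.mem_cons.mp hx with h1 | h2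
          · exact hrx h1.symm
          · have hrx' : r ≤ x := by
              rw [hr] at hrest_pw
              exact (List.pairwise_cons.mp hrest_pw).1 x h2
            exact hrx (le_antisymm hrx' hxr)
      -- counts
      have hcount_x : (x :: xs).count x = run.length + 1 := by
        rw [List.count_cons_self, ← hsplit, List.count_append,
          List.count_eq_zero.mpr hx_rest]
        have : run.count x = run.length :=
          List.count_eq_length.mpr (fun c hc => by simpa using (hrun_all c hc).symm)
        omega
      have hcount_ne : ∀ c, c ≠ x → (x :: xs).count c = rest.count c := by
        intro c hcx
        rw [← hsplit]
        simp [List.count_append,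
          List.count_eq_zero.mpr (fun hc => hcx (hrun_all c hc)), Ne.symm hcx]
      -- finsets
      have hrun_fs : run.toFinset ⊆ {x} := by
        intro c hc
        simp only [List.mem_toFinset] at hc
        simp [hrun_all c hc]
      have hfs : (x :: xs).toFinset = insert x rest.toFinset := by
        ext c
        simp only [List.toFinset_cons, ← hsplit, List.toFinset_append,
          Finset.mem_insert, Finset.mem_union, List.mem_toFinset]
        constructor
        · rintro (h1 | h2 | h3)
          · exact Or.inl h1
          · exact Or.inl (hrun_all c h2)
          · exact Or.inr h3
        · rintro (h1 | h2)
          · exact Or.inl h1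
          · exact Or.inr (Or.inr h2)
      have hxfs : x ∉ rest.toFinset := by simpa using hx_rest
      -- recursive call
      have hlen : rest.length < n := by
        rw [← hn]
        simpa using Nat.lt_succ_of_le (List.length_dropWhile_le _ _)
      have hrec := ih rest.length hlen rest hrest_pw rfl
      -- assemble
      rw [show pvRunScan (x :: xs)
          = (if ((run.length : Int) + 1) > 1 then pvDigitVal x * ((run.length : Int) + 1) else 0)
            + pvRunScan rest from by rw [pvRunScan]]
      rw [hrec, hfs, Finset.sum_insert hxfs]
      have hc1 : pvContrib (x :: xs) x
          = (if ((run.length : Int) + 1) > 1 then pvDigitVal x * ((run.length : Int) + 1) else 0) := by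
        simp only [pvContrib, hcount_x]
        push_cast
        by_cases h1 : (1 : Int) < (run.length : Int) + 1 <;> simp [h1]
      have hc2 : ∀ c ∈ rest.toFinset, pvContrib rest c = pvContrib (x :: xs) c := by
        intro c hc
        have hcx : c ≠ x := fun he => hxfs (he ▸ hc)
        simp [pvContrib, hcount_ne c hcx]
      rw [hc1, Finset.sum_congr rfl hc2]

theorem f_eq_f_alt (number : Int) : f number = f_alt number := by
  unfold f f_alt
  simp only [pv_dict_eq_counter]
  set digits := (PySem.Int.toChars number).filter PySem.Chars.isdigit with hdig
  set sdigits := PySem.List.sorted digits (fun c => c) false with hsd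
  have hperm : sdigits.Perm digits := PySem.List.sorted_perm digits _ false
  have hpw : sdigits.Pairwise (· ≤ ·) := by
    have := PySem.List.sorted_pairwise digits (fun c => c)
    simpa using this
  rw [PySem.Dict.items_counter, pv_foldl_if_add, pv_runScan_sorted sdigits hpw]
  simp only [zero_add, List.map_map]
  -- A side: sum over the distinct digits (Set.ofList) of the counter contributions
  have hA : ((PySem.Set.ofList digits : List Char).map
        ((fun kv : Char × Int => if kv.2 > 1 then pvDigitVal kv.1 * kv.2 else 0) ∘
          fun k => (k, (List.count k digits : Int)))).sum
      = ∑ c ∈ (PySem.Set.ofList digits : List Char).toFinset, pvContrib digits c := by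
    rw [List.sum_toFinset _ (PySem.Set.nodup_ofList digits)]
    simp only [pvContrib, gt_iff_lt]
    rfl
  rw [hA]
  -- same index set and same summand
  have hfs : (PySem.Set.ofList digits : List Char).toFinset = sdigits.toFinset := by
    ext c
    simp [PySem.Set.mem_ofList, hperm.mem_iff]
  rw [hfs]
  apply Finset.sum_congr rfl
  intro c _
  simp [pvContrib, hperm.count_eq]

-- ===== VERDICT (by name: the statement is the Claim_ definition above) =====
theorem f_spec : Claim_equal_f := by
  intro number _
  unfold Spec_f
  exact f_eq_f_alt number
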